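-- pv_equiv track=rewrite | github.com/gordonpn/solutions | multiprocessor-system.py | multiprocessor_system
-- ===== SOURCE A (Python) =====
-- from typing import List
--
-- def multiprocessor_system(num: int, ability: List[int], processes: int):
--     seconds = 0
--     while processes > 0:
--         seconds += 1
--         this_ability = max(ability)
--         position = ability.index(max(ability))
--         processes -= this_ability
--         ability[position] = this_ability // 2
--
--     return seconds
-- ===== SOURCE B (Python) =====
-- def multiprocessor_system(num, ability, processes):
--     # Greedy always takes the current maximum, so the values taken are exactly
--     # the halving chains a, a//2, a//4, ... (>0) of all abilities, consumed in
--     # descending order.  Generate them once, sort, and scan a prefix.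
--     values = []
--     for a in ability:
--         while a > 0:
--             values.append(a)
--             a //= 2
--     values.sort(reverse=True)
--     seconds = 0
--     for v in values:
--         if processes <= 0:
--             break
--         processes -= v
--         seconds += 1
--     return seconds
-- ===== Notes on version B (the rewrite author's own statement) =====
-- stated objective: alternative
-- what changed: Instead of rescanning the whole list for its max every second, B generates each ability's halving chain once, sorts all chain values descending, and counts how many of the largest values are needed to cover the workload (the greedy always consumes values in globally descending order).
import Mathlib
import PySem

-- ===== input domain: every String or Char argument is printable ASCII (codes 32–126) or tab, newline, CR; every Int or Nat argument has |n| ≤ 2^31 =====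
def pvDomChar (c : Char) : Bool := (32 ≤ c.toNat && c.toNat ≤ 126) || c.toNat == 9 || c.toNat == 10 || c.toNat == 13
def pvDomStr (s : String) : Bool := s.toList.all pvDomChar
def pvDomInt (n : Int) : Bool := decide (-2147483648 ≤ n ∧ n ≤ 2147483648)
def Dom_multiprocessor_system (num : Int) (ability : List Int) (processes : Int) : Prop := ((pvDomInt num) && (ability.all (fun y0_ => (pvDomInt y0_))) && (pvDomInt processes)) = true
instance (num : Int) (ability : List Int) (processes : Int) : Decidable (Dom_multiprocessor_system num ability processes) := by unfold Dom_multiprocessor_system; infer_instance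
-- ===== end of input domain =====

-- B replaces the per-second rescan for the maximum by one flatten-sort-scan pass;
-- equivalence is about the RETURN value only: Python A mutates `ability` in place, B does not.

-- ===== PORT A =====
-- One iteration of A's while loop per fuel unit; under Pre_ each iteration lowers
-- `processes` by at least 1, so fuel `processes.toNat` covers the whole run
-- (the fuel only makes the same computation total; it never changes a result reached).
def pvLoopA (fuel : Nat) (seconds : Int) (ability : List Int) (processes : Int) : Int :=
  match fuel with
  | 0 => seconds
  | fuel + 1 =>
    if 0 < processes then
      match PySem.List.max? ability (fun x => x) with
      | none => seconds        -- Python: max([]) raises ValueError (excluded by Pre_)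
      | some m =>
        match PySem.List.index? ability m with
        | none => seconds      -- unreachable: the max is a member
        | some pos =>
          pvLoopA fuel (seconds + 1) (ability.set pos (PySem.Int.floordiv m 2)) (processes - m)
    else seconds

def multiprocessor_system (num : Int) (ability : List Int) (processes : Int) : Int :=
  pvLoopA processes.toNat 0 ability processes

-- ===== PORT B =====
-- values appended for one ability a: a, a//2, a//4, … while > 0
def pvChain (a : Int) : List Int :=
  if h : 0 < a then a :: pvChain (PySem.Int.floordiv a 2) else []
termination_by a.toNat
decreasing_by
  rw [PySem.Int.floordiv_eq_ediv_of_pos (by norm_num : (0:Int) < 2)]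
  omega

def pvExpand (ability : List Int) : List Int := ability.flatMap pvChain

def pvScan : List Int → Int → Int → Int
  | [], _, seconds => seconds
  | v :: vs, processes, seconds =>
    if processes ≤ 0 then seconds else pvScan vs (processes - v) (seconds + 1)

def multiprocessor_system_alt (num : Int) (ability : List Int) (processes : Int) : Int :=
  pvScan (PySem.List.sorted (pvExpand ability) (fun x => x) true) processes 0

-- ===== PRECONDITION & SPEC =====
-- total work extractable from one ability value a: a + a//2 + a//4 + … = 2a - popcount(a)
def pvCapF (a : Int) : Int :=
  if 0 < a then 2 * a - (PySem.Int.bitCount a : Int) else 0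

-- Pre_ excludes exactly the inputs where Python A does not return: with less total available
-- work than `processes`, A's while loop raises ValueError on max([]) or never terminates.
def Pre_multiprocessor_system (num : Int) (ability : List Int) (processes : Int) : Prop :=
  0 < processes → processes ≤ (ability.map pvCapF).sum
instance (num : Int) (ability : List Int) (processes : Int) : Decidable (Pre_multiprocessor_system num ability processes) := by unfold Pre_multiprocessor_system; infer_instance

def pvWitness_multiprocessor_system : Int × List Int × Int := (0, [5, 3], 6)

def Spec_multiprocessor_system (num : Int) (ability : List Int) (processes : Int) (out : Int) : Prop := out = multiprocessor_system_alt num ability processes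
instance (num : Int) (ability : List Int) (processes : Int) (out : Int) : Decidable (Spec_multiprocessor_system num ability processes out) := by unfold Spec_multiprocessor_system; infer_instance

-- ===== CLAIM (what is proved, stated in full; the proofs are below) =====
def Claim_equal_multiprocessor_system : Prop := ∀ (num : Int) (ability : List Int) (processes : Int), Dom_multiprocessor_system num ability processes → Pre_multiprocessor_system num ability processes → Spec_multiprocessor_system num ability processes (multiprocessor_system num ability processes)

-- ===== LEMMAS AND PROOFS =====

theorem pvScan_nonpos (l : List Int) (p s : Int) (hp : p ≤ 0) : pvScan l p s = s := by
  cases l with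
  | nil => rfl
  | cons v vs => simp [pvScan, hp]

theorem pvChain_pos (a : Int) : ∀ x ∈ pvChain a, 0 < x := by
  fun_induction pvChain a with
  | case1 a h ih =>
    intro x hx
    rcases List.mem_cons.mp hx with rfl | hx
    · exact h
    · exact ih x hx
  | case2 a h => intro x hx; simp at hx

theorem pvChain_le (a : Int) : ∀ x ∈ pvChain a, x ≤ a := by
  fun_induction pvChain a with
  | case1 a h ih =>
    intro x hx
    rcases List.mem_cons.mp hx with rfl | hx
    · exact le_refl x
    · calc x ≤ PySem.Int.floordiv a 2 := ih x hx
        _ ≤ a := by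
          rw [PySem.Int.floordiv_eq_ediv_of_pos (by norm_num : (0:Int) < 2)]; omega
  | case2 a h => intro x hx; simp at hx

theorem pvChain_cons_of_pos (a : Int) (h : 0 < a) :
    pvChain a = a :: pvChain (PySem.Int.floordiv a 2) := by
  rw [pvChain]; simp [h]

theorem pvCapF_of_nonneg (x : Int) (hx : 0 ≤ x) :
    pvCapF x = 2 * x - (PySem.Int.bitCount x : Int) := by
  unfold pvCapF
  by_cases h : 0 < x
  · rw [if_pos h]
  · have hx0 : x = 0 := le_antisymm (not_lt.mp h) hx
    subst hx0; simp [PySem.Int.bitCount_zero]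

theorem pvCapF_eq_sum (a : Int) : pvCapF a = (pvChain a).sum := by
  fun_induction pvChain a with
  | case1 a h ih =>
    have hfd : 0 ≤ PySem.Int.floordiv a 2 := by
      rw [PySem.Int.floordiv_eq_ediv_of_pos (by norm_num : (0:Int) < 2)]; omega
    rw [List.sum_cons, ← ih, pvCapF_of_nonneg _ hfd, pvCapF_of_nonneg a (le_of_lt h),
      PySem.Int.bitCount_of_pos h,
      PySem.Int.floordiv_eq_ediv_of_pos (by norm_num : (0:Int) < 2),
      PySem.Int.mod_eq_emod_of_pos (by norm_num : (0:Int) < 2)]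
    push_cast
    omega
  | case2 a h => simp [pvCapF, h]

theorem pvExpand_sum (l : List Int) : (l.map pvCapF).sum = (pvExpand l).sum := by
  induction l with
  | nil => rfl
  | cons a t ih => simp [pvExpand, List.flatMap_cons, pvCapF_eq_sum, ih, pvExpand]

-- sorted-descending of (m :: l) when m dominates l
theorem sortedRev_cons_max (l l' : List Int) (m : Int)
    (hperm : l'.Perm (m :: l)) (hmax : ∀ x ∈ l, x ≤ m) :
    PySem.List.sorted l' (fun x => x) true
      = m :: PySem.List.sorted l (fun x => x) true := by
  refine List.Perm.eq_of_pairwise (le := fun a b => b ≤ a)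
    (fun a b _ _ h1 h2 => le_antisymm h2 h1) ?_ ?_ ?_
  · exact PySem.List.sorted_pairwise_rev l' (fun x => x)
  · refine List.Pairwise.cons ?_ (PySem.List.sorted_pairwise_rev l (fun x => x))
    intro x hx
    exact hmax x ((PySem.List.mem_sorted l (fun x => x) true x).mp hx)
  · exact (PySem.List.sorted_perm l' (fun x => x) true).trans
      (hperm.trans (List.Perm.cons m (PySem.List.sorted_perm l (fun x => x) true).symm))

-- the multiset step: taking the (positive) max m out of `ability` and putting m//2 back
theorem pvExpand_step (pre suf : List Int) (m : Int) (hm : 0 < m) :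
    (pvExpand (pre ++ m :: suf)).Perm
      (m :: pvExpand (pre ++ PySem.Int.floordiv m 2 :: suf)) := by
  simp only [pvExpand, List.flatMap_append, List.flatMap_cons]
  rw [pvChain_cons_of_pos m hm]
  simpa only [List.cons_append, List.append_assoc] using
    (List.perm_middle (l₁ := pre.flatMap pvChain) (a := m)
      (l₂ := pvChain (PySem.Int.floordiv m 2) ++ suf.flatMap pvChain))

theorem pvMain (fuel : Nat) : ∀ (seconds : Int) (ability : List Int) (processes : Int),
    processes ≤ (fuel : Int) →
    (0 < processes → processes ≤ (pvExpand ability).sum) →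
    pvLoopA fuel seconds ability processes
      = pvScan (PySem.List.sorted (pvExpand ability) (fun x => x) true) processes seconds := by
  induction fuel with
  | zero =>
    intro seconds ability processes hf _
    rw [pvScan_nonpos _ _ _ (by exact_mod_cast hf)]
    rfl
  | succ fuel ih =>
    intro seconds ability processes hf hcap
    by_cases hp : 0 < processes
    · have hsum : processes ≤ (pvExpand ability).sum := hcap hp
      -- some chain value is positive, so some ability is positive
      have hne : pvExpand ability ≠ [] := by
        intro h0; rw [h0] at hsum; simp at hsum; omega
      obtain ⟨y, hy⟩ := List.exists_mem_of_ne_nil _ hne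
      obtain ⟨a0, ha0, hya⟩ := List.mem_flatMap.mp hy
      -- the max of ability
      have hmne : PySem.List.max? ability (fun x => x) ≠ none := by
        intro h
        rw [PySem.List.max?_eq_none_iff] at h
        rw [h] at ha0; simp at ha0
      obtain ⟨m, hm⟩ := Option.ne_none_iff_exists'.mp hmne
      have hmmem : m ∈ ability := PySem.List.max?_mem hm
      have hmmax : ∀ y ∈ ability, y ≤ m := PySem.List.max?_isMax hm
      have hmpos : 0 < m :=
        lt_of_lt_of_le (lt_of_lt_of_le (pvChain_pos a0 y hya) (pvChain_le a0 y hya))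
          (hmmax a0 ha0)
      have hkne : PySem.List.index? ability m ≠ none := by
        intro h
        rw [PySem.List.index?_eq_none_iff] at h
        exact h hmmem
      obtain ⟨k, hk⟩ := Option.ne_none_iff_exists'.mp hkne
      obtain ⟨pre, suf, habl, hlen, _⟩ := (PySem.List.index?_eq_some_iff ability m k).mp hk
      have hset : ability.set k (PySem.Int.floordiv m 2)
          = pre ++ PySem.Int.floordiv m 2 :: suf := by
        subst habl; subst hlen
        rw [List.set_append_right _ _ (le_refl pre.length)]
        simp
      -- A takes one step
      have hA : pvLoopA (fuel + 1) seconds ability processes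
          = pvLoopA fuel (seconds + 1)
              (pre ++ PySem.Int.floordiv m 2 :: suf) (processes - m) := by
        rw [pvLoopA]; simp only [hp, if_pos, hm, hk, hset]
      -- B's sorted list starts with m
      set abl' := pre ++ PySem.Int.floordiv m 2 :: suf with habl'
      have hstep : (pvExpand ability).Perm (m :: pvExpand abl') := by
        rw [habl]; exact pvExpand_step pre suf m hmpos
      have hble : ∀ x ∈ pvExpand abl', x ≤ m := by
        intro x hx
        rcases List.mem_flatMap.mp hx with ⟨b, hb, hxb⟩
        have hxle : x ≤ b := pvChain_le b x hxb
        rcases List.mem_append.mp hb with hbpre | hbc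
        · exact le_trans hxle (hmmax b (habl ▸ List.mem_append_left _ hbpre))
        · rcases List.mem_cons.mp hbc with rfl | hbsuf
          · refine le_trans hxle ?_
            rw [PySem.Int.floordiv_eq_ediv_of_pos (by norm_num : (0:Int) < 2)]; omega
          · exact le_trans hxle (hmmax b (habl ▸ List.mem_append_right _ (List.mem_cons_of_mem _ hbsuf)))
      have hsort := sortedRev_cons_max (pvExpand abl') (pvExpand ability) m hstep hble
      have hsc : pvScan (m :: PySem.List.sorted (pvExpand abl') (fun x => x) true)
          processes seconds
          = pvScan (PySem.List.sorted (pvExpand abl') (fun x => x) true)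
              (processes - m) (seconds + 1) := by
        simp only [pvScan]
        rw [if_neg (show ¬ processes ≤ 0 by omega)]
      rw [hA, hsort, hsc]
      refine ih (seconds + 1) abl' (processes - m) (by omega) ?_
      intro _
      have hse : (pvExpand ability).sum = m + (pvExpand abl').sum := by
        rw [hstep.sum_eq]; simp
      omega
    · rw [pvLoopA, pvScan_nonpos _ _ _ (by omega)]
      simp [hp]

-- ===== VERDICT (by name: the statement is the Claim_ definition above) =====
theorem multiprocessor_system_spec : Claim_equal_multiprocessor_system := by
  intro num ability processes _ hpre
  unfold Spec_multiprocessor_system multiprocessor_system multiprocessor_system_alt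
  refine pvMain processes.toNat 0 ability processes (by omega) ?_
  intro hp
  rw [← pvExpand_sum]
  exact hpre hp
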